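-- pv_equiv track=rewrite | github.com/gimmeDG/sciqa-qr-rag | rag/rag_framework.py | _strip_doi_prefix
-- ===== SOURCE A (Python) =====
-- def _strip_doi_prefix(query: str) -> str:
--     """Strip everything up to the first 'that' or 'where' for retrieval."""
--     lower = query.lower()
--     positions = []
--     for kw in (" that ", " where "):
--         idx = lower.find(kw)
--         if idx != -1:
--             positions.append((idx, len(kw)))
--     if positions:
--         idx, kw_len = min(positions, key=lambda x: x[0])
--         return query[idx + kw_len:].strip() or query
--     return query
-- ===== SOURCE B (Python) =====
-- def _strip_doi_prefix(query: str) -> str: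
--     """Strip everything up to the first 'that' or 'where' for retrieval."""
--     for i in range(len(query)):
--         if query[i:i + 6].lower() == " that ":
--             return query[i + 6:].strip() or query
--         if query[i:i + 7].lower() == " where ":
--             return query[i + 7:].strip() or query
--     return query
-- ===== Notes on version B (the rewrite author's own statement) =====
-- stated objective: alternative
-- what changed: B replaces A's two full substring searches plus min-by-position selection with a single left-to-right scan that tests both keywords at each position (ordered alternatives, early return).
import Mathlib
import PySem

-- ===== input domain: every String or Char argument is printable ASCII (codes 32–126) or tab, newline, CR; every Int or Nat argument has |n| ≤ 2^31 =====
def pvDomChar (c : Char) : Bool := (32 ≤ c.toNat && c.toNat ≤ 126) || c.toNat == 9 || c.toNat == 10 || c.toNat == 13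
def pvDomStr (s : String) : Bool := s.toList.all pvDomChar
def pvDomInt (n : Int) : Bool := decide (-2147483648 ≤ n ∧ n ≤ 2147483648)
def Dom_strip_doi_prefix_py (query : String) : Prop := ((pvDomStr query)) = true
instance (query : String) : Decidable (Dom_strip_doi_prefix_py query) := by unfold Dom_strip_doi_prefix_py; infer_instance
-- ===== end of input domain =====

-- B does one left-to-right scan testing both keywords at each position instead of A's two finds + min; return values proved equal on all inputs.
-- ===== PORT A =====
def strip_doi_prefix_py (query : String) : String :=
  let lower := PySem.Str.lower query
  let positions : List (Int × Int) :=
    ([" that ", " where "] : List String).foldl (fun acc kw =>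
      let idx := PySem.Str.find lower kw
      if idx ≠ -1 then acc ++ [(idx, PySem.Str.len kw)] else acc) []
  match PySem.List.min? positions (fun x => x.1) with
  | some p =>
      let tail := PySem.Str.strip (PySem.Str.slice query (some (p.1 + p.2)) none)
      if tail = "" then query else tail
  | none => query

-- ===== PORT B =====
-- the `for i in range(len(query))` loop of Source B as structural recursion on the suffix:
-- query[i:i+6] is (take 6) of the current suffix, query[i+6:] is (drop 6) of it
def bScanAux : List Char → Option (List Char)
  | [] => none
  | c :: rest =>
      if PySem.Chars.lower (List.take 6 (c :: rest)) = " that ".toList then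
        some (List.drop 6 (c :: rest))
      else if PySem.Chars.lower (List.take 7 (c :: rest)) = " where ".toList then
        some (List.drop 7 (c :: rest))
      else bScanAux rest

def strip_doi_prefix_py_alt (query : String) : String :=
  match bScanAux query.toList with
  | some t =>
      let tail := PySem.Chars.strip t
      if tail = [] then query else String.ofList tail
  | none => query

-- ===== PRECONDITION & SPEC =====
def Spec_strip_doi_prefix_py (query : String) (out : String) : Prop := out = strip_doi_prefix_py_alt query
instance (query : String) (out : String) : Decidable (Spec_strip_doi_prefix_py query out) := by unfold Spec_strip_doi_prefix_py; infer_instance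

-- ===== CLAIM (what is proved, stated in full; the proofs are below) =====
def Claim_equal_strip_doi_prefix_py : Prop := ∀ (query : String), Dom_strip_doi_prefix_py query → Spec_strip_doi_prefix_py query (strip_doi_prefix_py query)

-- ===== LEMMAS AND PROOFS =====

-- first index (if any) at which `sub` occurs in a list
def firstIdx (sub : List Char) : List Char → Option Nat
  | [] => none
  | c :: rest => if sub <+: (c :: rest) then some 0 else (firstIdx sub rest).map (· + 1)

theorem firstIdx_none_iff (sub : List Char) (hsub : sub ≠ []) (l : List Char) :
    firstIdx sub l = none ↔ ¬ sub <:+: l := by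
  induction l with
  | nil => simp [firstIdx, hsub]
  | cons c rest ih =>
      by_cases hp : sub <+: (c :: rest)
      · simp [firstIdx, hp, List.infix_cons_iff]
      · simp [firstIdx, hp, List.infix_cons_iff, ih]

theorem firstIdx_some (sub l : List Char) (i : Nat) (h : firstIdx sub l = some i) :
    sub <+: l.drop i ∧ ∀ j < i, ¬ sub <+: l.drop j := by
  induction l generalizing i with
  | nil => simp [firstIdx] at h
  | cons c rest ih =>
      by_cases hp : sub <+: (c :: rest)
      · simp [firstIdx, hp] at h
        subst h
        exact ⟨hp, by omega⟩
      · simp [firstIdx, hp] at h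
        obtain ⟨i', hi', rfl⟩ := h
        obtain ⟨h1, h2⟩ := ih i' hi'
        refine ⟨by simpa using h1, ?_⟩
        intro j hj
        cases j with
        | zero => simpa using hp
        | succ k => simpa using h2 k (by omega)

theorem find_eq_firstIdx (sub : List Char) (hsub : sub ≠ []) (l : List Char) :
    PySem.Chars.find l sub = match firstIdx sub l with | none => -1 | some i => (i : Int) := by
  cases h : firstIdx sub l with
  | none =>
      have := (firstIdx_none_iff sub hsub l).mp h
      simpa [PySem.Chars.find_eq_neg_one_iff] using this
  | some i =>
      obtain ⟨hpre, hmin⟩ := firstIdx_some sub l i h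
      have hinf : sub <:+: l := hpre.isInfix.trans (List.drop_suffix i l).isInfix
      have hnn : 0 ≤ PySem.Chars.find l sub := (PySem.Chars.find_nonneg_iff l sub).mpr hinf
      obtain ⟨hp2, hm2⟩ := PySem.Chars.find_spec hnn
      have ht : (PySem.Chars.find l sub).toNat = i := by
        rcases lt_trichotomy (PySem.Chars.find l sub).toNat i with hlt | heq | hgt
        · exact absurd hp2 (hmin _ hlt)
        · exact heq
        · exact absurd hpre (hm2 i hgt)
      simp only []
      omega

-- the combined "earliest keyword, ' that ' first on ties" selection both loops implement
def pick (o1 o2 : Option Nat) (l : List Char) : Option (List Char) :=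
  match o1, o2 with
  | none, none => none
  | some i, none => some (l.drop (i + 6))
  | none, some j => some (l.drop (j + 7))
  | some i, some j => if i ≤ j then some (l.drop (i + 6)) else some (l.drop (j + 7))
theorem lower_take_eq_iff (l sub : List Char) (n : Nat) (hn : sub.length = n) :
    (PySem.Chars.lower (List.take n l) = sub) ↔ sub <+: PySem.Chars.lower l := by
  rw [List.prefix_iff_eq_take, ← hn]
  simp [PySem.Chars.lower, List.map_take, eq_comm, hn]

theorem bScanAux_eq (l : List Char) :
    bScanAux l = pick (firstIdx " that ".toList (PySem.Chars.lower l))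
      (firstIdx " where ".toList (PySem.Chars.lower l)) l := by
  induction l with
  | nil => rfl
  | cons c rest ih =>
      have hl : PySem.Chars.lower (c :: rest) = PySem.Chars.lowerChar c :: PySem.Chars.lower rest := rfl
      by_cases h1 : " that ".toList <+: PySem.Chars.lower (c :: rest)
      · rw [bScanAux, if_pos ((lower_take_eq_iff _ _ 6 (by decide)).mpr h1)]
        rw [hl, firstIdx, if_pos (by rw [← hl]; exact h1)]
        cases h2 : firstIdx " where ".toList (PySem.Chars.lowerChar c :: PySem.Chars.lower rest) <;>
          simp [pick]
      · rw [bScanAux, if_neg (by rw [lower_take_eq_iff _ _ 6 (by decide)]; exact h1)]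
        by_cases h2 : " where ".toList <+: PySem.Chars.lower (c :: rest)
        · rw [if_pos ((lower_take_eq_iff _ _ 7 (by decide)).mpr h2)]
          rw [hl, firstIdx, if_neg (by rw [← hl]; exact h1), firstIdx,
            if_pos (by rw [← hl]; exact h2)]
          cases h3 : firstIdx " that ".toList (PySem.Chars.lower rest) <;> simp [pick]
        · rw [if_neg (by rw [lower_take_eq_iff _ _ 7 (by decide)]; exact h2)]
          rw [hl, firstIdx, if_neg (by rw [← hl]; exact h1), firstIdx,
            if_neg (by rw [← hl]; exact h2)]
          rw [ih]
          cases h3 : firstIdx " that ".toList (PySem.Chars.lower rest) with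
          | none =>
              cases h4 : firstIdx " where ".toList (PySem.Chars.lower rest) <;>
                simp [pick, List.drop_succ_cons]
          | some i =>
              cases h4 : firstIdx " where ".toList (PySem.Chars.lower rest) with
              | none => simp [pick, show i + 1 + 6 = (i + 6) + 1 by omega, List.drop_succ_cons]
              | some j =>
                  simp only [pick, Option.map_some]
                  by_cases hij : i ≤ j
                  · rw [if_pos hij, if_pos (by omega),
                      show i + 1 + 6 = (i + 6) + 1 by omega, List.drop_succ_cons]
                  · rw [if_neg hij, if_neg (by omega),
                      show j + 1 + 7 = (j + 7) + 1 by omega, List.drop_succ_cons]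

theorem tail_eq (q : String) (x : Int) (e : Nat) (hx : x = e) :
    (if PySem.Str.strip (PySem.Str.slice q (some x) none) = "" then q
     else PySem.Str.strip (PySem.Str.slice q (some x) none)) =
    (if PySem.Chars.strip (q.toList.drop e) = [] then q
     else String.ofList (PySem.Chars.strip (q.toList.drop e))) := by
  subst hx
  have hs : PySem.Str.slice q (some ((e : Int))) none = String.ofList (q.toList.drop e) := by
    simp [PySem.Str.slice, PySem.Chars.slice_eq_listSlice, PySem.List.slice_from_natCast]
  have ht : PySem.Str.strip (String.ofList (q.toList.drop e)) =
      String.ofList (PySem.Chars.strip (q.toList.drop e)) := by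
    simp [PySem.Str.strip, String.toList_ofList]
  rw [hs, ht]
  have hiff : (String.ofList (PySem.Chars.strip (q.toList.drop e)) = "") ↔
      PySem.Chars.strip (q.toList.drop e) = [] := by
    constructor
    · intro hc
      simpa [String.toList_ofList] using congrArg String.toList hc
    · intro hc; rw [hc]
  by_cases h : PySem.Chars.strip (q.toList.drop e) = []
  · rw [if_pos (hiff.mpr h), if_pos h]
  · rw [if_neg (fun hc => h (hiff.mp hc)), if_neg h]

theorem a_eq_b (q : String) : strip_doi_prefix_py q = strip_doi_prefix_py_alt q := by
  unfold strip_doi_prefix_py strip_doi_prefix_py_alt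
  rw [bScanAux_eq]
  have g1 : PySem.Str.find (PySem.Str.lower q) " that " =
      PySem.Chars.find (PySem.Chars.lower q.toList) " that ".toList := by
    simp [PySem.Str.find, PySem.Str.lower]
  have g2 : PySem.Str.find (PySem.Str.lower q) " where " =
      PySem.Chars.find (PySem.Chars.lower q.toList) " where ".toList := by
    simp [PySem.Str.find, PySem.Str.lower]
  have e1 := find_eq_firstIdx " that ".toList (by decide) (PySem.Chars.lower q.toList)
  have e2 := find_eq_firstIdx " where ".toList (by decide) (PySem.Chars.lower q.toList)
  simp only [List.foldl_cons, List.foldl_nil]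
  cases h1 : firstIdx " that ".toList (PySem.Chars.lower q.toList) with
  | none =>
      have e1' : PySem.Chars.find (PySem.Chars.lower q.toList) " that ".toList = -1 := by
        rw [e1, h1]
      cases h2 : firstIdx " where ".toList (PySem.Chars.lower q.toList) with
      | none =>
          have e2' : PySem.Chars.find (PySem.Chars.lower q.toList) " where ".toList = -1 := by
            rw [e2, h2]
          rw [g1, g2, e1', e2']
          simp [pick, PySem.List.min?]
      | some j =>
          have e2' : PySem.Chars.find (PySem.Chars.lower q.toList) " where ".toList = (j : Int) := by
            rw [e2, h2]
          rw [g1, g2, e1', e2']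
          rw [if_pos (show ((j : Int)) ≠ -1 from by omega),
            if_neg (show ¬((-1 : Int) ≠ -1) from by decide)]
          simp only [pick, PySem.List.min?, List.foldl, List.nil_append,
            show PySem.Str.len " where " = 7 from by decide]
          have := tail_eq q ((j : Int) + 7) (j + 7) (by omega)
          simpa using this
  | some i =>
      have e1' : PySem.Chars.find (PySem.Chars.lower q.toList) " that ".toList = (i : Int) := by
        rw [e1, h1]
      cases h2 : firstIdx " where ".toList (PySem.Chars.lower q.toList) with
      | none =>
          have e2' : PySem.Chars.find (PySem.Chars.lower q.toList) " where ".toList = -1 := by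
            rw [e2, h2]
          rw [g1, g2, e1', e2']
          rw [if_neg (show ¬((-1 : Int) ≠ -1) from by decide),
            if_pos (show ((i : Int)) ≠ -1 from by omega)]
          simp only [pick, PySem.List.min?, List.foldl, List.nil_append,
            show PySem.Str.len " that " = 6 from by decide]
          have := tail_eq q ((i : Int) + 6) (i + 6) (by omega)
          simpa using this
      | some j =>
          have e2' : PySem.Chars.find (PySem.Chars.lower q.toList) " where ".toList = (j : Int) := by
            rw [e2, h2]
          rw [g1, g2, e1', e2']
          rw [if_pos (show ((j : Int)) ≠ -1 from by omega),
            if_pos (show ((i : Int)) ≠ -1 from by omega)]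
          simp only [pick, PySem.List.min?, List.foldl, List.nil_append, List.cons_append,
            show PySem.Str.len " that " = 6 from by decide,
            show PySem.Str.len " where " = 7 from by decide]
          by_cases hij : i ≤ j
          · rw [if_neg (show ¬((j : Int) < (i : Int)) from by omega), if_pos hij]
            have := tail_eq q ((i : Int) + 6) (i + 6) (by omega)
            simpa using this
          · rw [if_pos (show ((j : Int) < (i : Int)) from by omega), if_neg hij]
            have := tail_eq q ((j : Int) + 7) (j + 7) (by omega)
            simpa using this

-- ===== VERDICT (by name: the statement is the Claim_ definition above) =====
theorem strip_doi_prefix_py_spec : Claim_equal_strip_doi_prefix_py := by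
  intro q _
  unfold Spec_strip_doi_prefix_py
  exact a_eq_b q
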